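-- pv_equiv track=rewrite | github.com/DaREf-MS/dependency-upgrades | scripts/collect_pr_metrics.py | infer_ecosystem_and_directness
-- ===== SOURCE A (Python) =====
-- from typing import Optional, Tuple, Dict, Any, List
--
-- LOCKFILE_HINTS = {
--     "npm": ["package-lock.json", "npm-shrinkwrap.json", "pnpm-lock.yaml", "yarn.lock"]
-- }
--
-- MANIFEST_HINTS = {
--     "npm": ["package.json"]
-- }
--
-- def infer_ecosystem_and_directness(changed_files: List[str]) -> Tuple[Optional[str], Optional[str]]:
--     """
--     Returns: (ecosystem, direct_or_indirect)
--     Heuristic: if a manifest changed -> direct; only lockfile -> indirect.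
--     """
--     if not changed_files:
--         return None, None
--     paths = [f.lower() for f in changed_files]
--     eco = None
--     for e, manis in MANIFEST_HINTS.items():
--         if any(any(m in p for m in manis) for p in paths):
--             eco = e
--             break
--     if not eco:
--         for e, locks in LOCKFILE_HINTS.items():
--             if any(any(l in p for l in locks) for p in paths):
--                 eco = e
--                 break
--     direct = None
--     if eco:
--         has_manifest = any(
--             any(m in p for m in MANIFEST_HINTS[eco]) for p in paths)
--         has_lock = any(any(l in p for l in LOCKFILE_HINTS.get(eco, []))
--                        for p in paths)
--         if has_manifest:
--             direct = "direct"
--         elif has_lock and not has_manifest: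
--             direct = "indirect"
--     return eco, direct
-- ===== SOURCE B (Python) =====
-- from typing import Optional, Tuple, List
--
-- LOCKFILE_HINTS = {
--     "npm": ["package-lock.json", "npm-shrinkwrap.json", "pnpm-lock.yaml", "yarn.lock"]
-- }
--
-- MANIFEST_HINTS = {
--     "npm": ["package.json"]
-- }
--
-- def infer_ecosystem_and_directness(changed_files: List[str]) -> Tuple[Optional[str], Optional[str]]:
--     if not changed_files:
--         return None, None
--     has_manifest = False
--     has_lock = False
--     for f in changed_files:
--         p = f.lower()
--         has_manifest = has_manifest or any(m in p for m in MANIFEST_HINTS["npm"])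
--         has_lock = has_lock or any(l in p for l in LOCKFILE_HINTS["npm"])
--     eco = "npm" if (has_manifest or has_lock) else None
--     direct = "direct" if has_manifest else ("indirect" if has_lock else None)
--     return eco, direct
-- ===== Notes on version B (the rewrite author's own statement) =====
-- stated objective: simpler
-- what changed: A's two ecosystem-detection loops over hint dicts plus two separate rescans of the lowered paths are replaced by a single fold over the files computing two booleans (has_manifest, has_lock), from which both outputs are derived directly.
import Mathlib
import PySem

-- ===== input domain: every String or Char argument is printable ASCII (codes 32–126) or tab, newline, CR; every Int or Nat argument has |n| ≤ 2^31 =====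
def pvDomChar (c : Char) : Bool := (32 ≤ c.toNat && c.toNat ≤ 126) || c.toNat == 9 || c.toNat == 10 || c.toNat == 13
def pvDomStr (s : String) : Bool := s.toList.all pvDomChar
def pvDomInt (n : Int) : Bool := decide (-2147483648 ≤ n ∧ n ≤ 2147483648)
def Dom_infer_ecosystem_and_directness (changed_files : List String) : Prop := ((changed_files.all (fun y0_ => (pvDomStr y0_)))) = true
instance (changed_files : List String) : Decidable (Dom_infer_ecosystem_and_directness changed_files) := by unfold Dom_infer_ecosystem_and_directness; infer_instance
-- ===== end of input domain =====

-- B replaces A's two ecosystem-detection loops and two rescans of the lowered paths by a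
-- single fold computing (has_manifest, has_lock), from which both outputs are derived (simpler).


-- ===== PORT A =====
-- module constants, as association lists (Python dicts in insertion order)
def LOCKFILE_HINTS : PySem.Dict String (List String) :=
  PySem.Dict.mk [("npm", ["package-lock.json", "npm-shrinkwrap.json", "pnpm-lock.yaml", "yarn.lock"])]
def MANIFEST_HINTS : PySem.Dict String (List String) :=
  PySem.Dict.mk [("npm", ["package.json"])]

-- the 'for e, hints in D.items(): if any(any(h in p for h in hints) for p in paths): eco = e; break' loops
def pvFindEco (items : List (String × List String)) (paths : List String) : Option String :=
  match items with
  | [] => none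
  | (e, hs) :: rest =>
      if paths.any (fun p => hs.any (fun h => PySem.Str.isIn h p)) then some e
      else pvFindEco rest paths

def infer_ecosystem_and_directness (changed_files : List String) : Option String × Option String :=
  if changed_files = [] then (none, none) else
  let paths := changed_files.map PySem.Str.lower
  let eco0 := pvFindEco MANIFEST_HINTS.items paths
  let eco := match eco0 with
    | some e => some e
    | none => pvFindEco LOCKFILE_HINTS.items paths
  let direct : Option String :=
    match eco with
    | none => none
    | some e =>
      -- MANIFEST_HINTS[eco]: key is always present when eco is set, so getD [] is exact here
      let has_manifest := paths.any (fun p => (MANIFEST_HINTS.getD e []).any (fun m => PySem.Str.isIn m p))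
      let has_lock := paths.any (fun p => (LOCKFILE_HINTS.getD e []).any (fun l => PySem.Str.isIn l p))
      if has_manifest then some "direct"
      else if has_lock && !has_manifest then some "indirect"
      else none
  (eco, direct)

-- ===== PORT B =====
def infer_ecosystem_and_directness_alt (changed_files : List String) : Option String × Option String :=
  if changed_files = [] then (none, none) else
  let st := changed_files.foldl
    (fun (acc : Bool × Bool) f =>
      let p := PySem.Str.lower f
      (acc.1 || ["package.json"].any (fun m => PySem.Str.isIn m p),
       acc.2 || ["package-lock.json", "npm-shrinkwrap.json", "pnpm-lock.yaml", "yarn.lock"].any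
                  (fun l => PySem.Str.isIn l p)))
    (false, false)
  let eco : Option String := if st.1 || st.2 then some "npm" else none
  let direct : Option String := if st.1 then some "direct" else if st.2 then some "indirect" else none
  (eco, direct)

-- ===== PRECONDITION & SPEC =====
def Spec_infer_ecosystem_and_directness (changed_files : List String) (out : Option String × Option String) : Prop := out = infer_ecosystem_and_directness_alt changed_files
instance (changed_files : List String) (out : Option String × Option String) : Decidable (Spec_infer_ecosystem_and_directness changed_files out) := by unfold Spec_infer_ecosystem_and_directness; infer_instance

-- ===== CLAIM (what is proved, stated in full; the proofs are below) =====
def Claim_equal_infer_ecosystem_and_directness : Prop := ∀ (changed_files : List String), Dom_infer_ecosystem_and_directness changed_files → Spec_infer_ecosystem_and_directness changed_files (infer_ecosystem_and_directness changed_files)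

-- ===== LEMMAS AND PROOFS =====
def pvHitM (p : String) : Bool := ["package.json"].any (fun m => PySem.Str.isIn m p)
def pvHitL (p : String) : Bool :=
  ["package-lock.json", "npm-shrinkwrap.json", "pnpm-lock.yaml", "yarn.lock"].any
    (fun l => PySem.Str.isIn l p)

-- B's fold computes the disjunctions A computes with separate `any` passes
theorem pvFold_eq (xs : List String) (a b : Bool) :
    xs.foldl
      (fun (acc : Bool × Bool) f =>
        let p := PySem.Str.lower f
        (acc.1 || ["package.json"].any (fun m => PySem.Str.isIn m p),
         acc.2 || ["package-lock.json", "npm-shrinkwrap.json", "pnpm-lock.yaml", "yarn.lock"].any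
                    (fun l => PySem.Str.isIn l p)))
      (a, b)
    = (a || (xs.map PySem.Str.lower).any pvHitM, b || (xs.map PySem.Str.lower).any pvHitL) := by
  induction xs generalizing a b with
  | nil => simp
  | cons x xs ih =>
      rw [List.foldl_cons, ih]
      simp [pvHitM, pvHitL, Bool.or_assoc]

-- ===== VERDICT (by name: the statement is the Claim_ definition above) =====
theorem infer_ecosystem_and_directness_spec : Claim_equal_infer_ecosystem_and_directness := by
  intro changed_files _
  show infer_ecosystem_and_directness changed_files = infer_ecosystem_and_directness_alt changed_files
  unfold infer_ecosystem_and_directness infer_ecosystem_and_directness_alt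
  by_cases h : changed_files = []
  · simp [h]
  · simp only [if_neg h, pvFold_eq]
    simp only [pvFindEco, MANIFEST_HINTS, LOCKFILE_HINTS]
    rw [show (fun p => (["package.json"].any fun m => PySem.Str.isIn m p)) = pvHitM from rfl,
        show (fun p => (["package-lock.json", "npm-shrinkwrap.json", "pnpm-lock.yaml",
          "yarn.lock"].any fun l => PySem.Str.isIn l p)) = pvHitL from rfl]
    cases hm : (changed_files.map PySem.Str.lower).any pvHitM <;>
      cases hl : (changed_files.map PySem.Str.lower).any pvHitL <;>
        · simp [pvHitM, pvHitL] at hm hl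
          simp [hm, hl, PySem.Dict.getD, PySem.Dict.get?]
          try rw [if_neg (by simpa using hm), if_pos hm]
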